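-- pv_equiv track=rewrite | github.com/iskhakov-s/algorithms_class | assignments/classwork_for_recursion_analysis/q2_fast_pow10.py | fast_pow10
-- ===== SOURCE A (Python) =====
-- def fast_pow10(exp):
--     if exp == 0:
--         return 1
--     else:
--         num = fast_pow10(exp // 2)
--         if exp % 2 == 0:
--             return num * num
--         else:
--             return 10 * num * num
-- ===== SOURCE B (Python) =====
-- def fast_pow10(exp):
--     # Iterative bottom-up binary exponentiation over exp's bits.
--     result = 1
--     base = 10
--     while exp > 0:
--         if exp % 2 == 1:
--             result *= base
--         base *= base
--         exp //= 2
--     return result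
-- ===== Notes on version B (the rewrite author's own statement) =====
-- stated objective: alternative
-- what changed: Replaced the halving recursion with an explicit iterative binary-exponentiation loop maintaining (result, base) over the low bits of exp.
-- outside the precondition, e.g. on fast_pow10(-1): A raises RecursionError, B returns 1
import Mathlib
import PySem

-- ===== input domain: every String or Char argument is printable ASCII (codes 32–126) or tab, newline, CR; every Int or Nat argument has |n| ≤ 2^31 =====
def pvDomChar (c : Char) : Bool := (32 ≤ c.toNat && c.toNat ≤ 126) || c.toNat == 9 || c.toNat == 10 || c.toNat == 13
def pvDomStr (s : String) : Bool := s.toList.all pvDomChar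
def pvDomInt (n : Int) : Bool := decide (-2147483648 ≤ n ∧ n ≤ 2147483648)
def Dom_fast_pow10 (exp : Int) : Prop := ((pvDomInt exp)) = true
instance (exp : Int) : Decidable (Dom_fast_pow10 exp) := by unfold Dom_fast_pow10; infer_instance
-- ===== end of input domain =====

-- B replaces A's halving recursion with an iterative binary-exponentiation loop (same cost);
-- equivalence is claimed for exp ≥ 0, where A terminates (A recurses forever on negative exp).

-- ===== PORT A =====
-- A's recursion on exp//2; fuel = exp.toNat + 1 suffices for every exp ≥ 0 (where Python A
-- terminates); fuel 0 is only reached where Python A diverges (negative exp), outside Pre_.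
def fast_pow10Go : Nat → Int → Int
  | 0, _ => 1
  | Nat.succ f, exp =>
    if exp = 0 then 1
    else
      let num := fast_pow10Go f (PySem.Int.floordiv exp 2)
      if PySem.Int.mod exp 2 = 0 then num * num else 10 * num * num

def fast_pow10 (exp : Int) : Int := fast_pow10Go (exp.toNat + 1) exp

-- ===== PORT B =====
-- B's while-loop state (result, base, exp); terminates because exp.toNat strictly decreases.
def fast_pow10AltGo (result base exp : Int) : Int :=
  if 0 < exp then
    fast_pow10AltGo (if PySem.Int.mod exp 2 = 1 then result * base else result)
      (base * base) (PySem.Int.floordiv exp 2)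
  else result
termination_by exp.toNat
decreasing_by
  have : PySem.Int.floordiv exp 2 = exp / 2 := PySem.Int.floordiv_eq_ediv_of_pos (by omega)
  rw [this]; omega

def fast_pow10_alt (exp : Int) : Int := fast_pow10AltGo 1 10 exp

-- ===== PRECONDITION & SPEC =====
-- Pre_: exp ≥ 0; on negative exp Python A recurses forever ((-1)//2 == -1) and raises RecursionError.
def Pre_fast_pow10 (exp : Int) : Prop := 0 ≤ exp
instance (exp : Int) : Decidable (Pre_fast_pow10 exp) := by unfold Pre_fast_pow10; infer_instance
def pvWitness_fast_pow10 : Int := 6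

def Spec_fast_pow10 (exp : Int) (out : Int) : Prop := out = fast_pow10_alt exp
instance (exp : Int) (out : Int) : Decidable (Spec_fast_pow10 exp out) := by unfold Spec_fast_pow10; infer_instance

-- ===== CLAIM (what is proved, stated in full; the proofs are below) =====
def Claim_equal_fast_pow10 : Prop := ∀ (exp : Int), Dom_fast_pow10 exp → Pre_fast_pow10 exp → Spec_fast_pow10 exp (fast_pow10 exp)

-- ===== LEMMAS AND PROOFS =====

-- A's recursion computes 10 ^ exp (given enough fuel, for exp ≥ 0).
theorem fast_pow10Go_eq (f : Nat) : ∀ (exp : Int), 0 ≤ exp → exp.toNat < f →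
    fast_pow10Go f exp = 10 ^ exp.toNat := by
  induction f with
  | zero => intro exp _ h; omega
  | succ f ih =>
    intro exp hpos hf
    rw [fast_pow10Go]
    by_cases h0 : exp = 0
    · simp [h0]
    · have h1 : 0 < exp := by omega
      have hfd : PySem.Int.floordiv exp 2 = exp / 2 := PySem.Int.floordiv_eq_ediv_of_pos (by omega)
      have hmd : PySem.Int.mod exp 2 = exp % 2 := PySem.Int.mod_eq_emod_of_pos (by omega)
      have hhalf : (exp / 2).toNat = exp.toNat / 2 := by omega
      have hrec : fast_pow10Go f (PySem.Int.floordiv exp 2) = 10 ^ (exp.toNat / 2) := by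
        rw [hfd, ih (exp / 2) (by omega) (by omega), hhalf]
      simp only [h0, if_false, hrec, hmd]
      have key : ∀ m : Nat, (10:Int) ^ m = 10 ^ (m / 2) * 10 ^ (m / 2) * 10 ^ (m % 2) := by
        intro m; rw [← pow_add, ← pow_add]; congr 1; omega
      by_cases he : exp % 2 = 0
      · have hm : exp.toNat % 2 = 0 := by omega
        rw [if_pos he, key exp.toNat, hm, pow_zero, mul_one]
      · have hm : exp.toNat % 2 = 1 := by omega
        rw [if_neg he, key exp.toNat, hm, pow_one]
        ring

-- B's loop computes result * base ^ exp (for any result, base, with exp ≥ 0 implicit via toNat).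
theorem fast_pow10AltGo_eq (n : Nat) : ∀ (exp result base : Int), exp.toNat = n →
    fast_pow10AltGo result base exp = result * base ^ exp.toNat := by
  induction n using Nat.strong_induction_on with
  | _ n ih =>
    intro exp result base hn
    rw [fast_pow10AltGo]
    by_cases h : 0 < exp
    · have hfd : PySem.Int.floordiv exp 2 = exp / 2 := PySem.Int.floordiv_eq_ediv_of_pos (by omega)
      have hmd : PySem.Int.mod exp 2 = exp % 2 := PySem.Int.mod_eq_emod_of_pos (by omega)
      rw [if_pos h, hfd, hmd,
        ih (exp / 2).toNat (by omega) _ _ _ rfl]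
      have hhalf : (exp / 2).toNat = exp.toNat / 2 := by omega
      rw [hhalf]
      have key : (base * base) ^ (exp.toNat / 2) * base ^ (exp.toNat % 2) = base ^ exp.toNat := by
        rw [mul_pow, ← pow_add, ← pow_add]; congr 1; omega
      by_cases he : exp % 2 = 1
      · have hm : exp.toNat % 2 = 1 := by omega
        rw [if_pos he, ← key, hm, pow_one]; ring
      · have hm : exp.toNat % 2 = 0 := by omega
        rw [if_neg he, ← key, hm, pow_zero, mul_one]
    · have : exp.toNat = 0 := by omega
      rw [if_neg h, this, pow_zero, mul_one]

-- ===== VERDICT (by name: the statement is the Claim_ definition above) =====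
theorem fast_pow10_spec : Claim_equal_fast_pow10 := by
  intro exp _ hpre
  unfold Spec_fast_pow10 fast_pow10 fast_pow10_alt
  rw [fast_pow10Go_eq (exp.toNat + 1) exp hpre (by omega),
    fast_pow10AltGo_eq exp.toNat exp 1 10 rfl, one_mul]
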